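-- pv_equiv track=rewrite | github.com/akshitsethi7/astro | 15-EXTRACTION-SYSTEM/progress_tracker.py | calculate_topic_coverage
-- ===== SOURCE A (Python) =====
-- from typing import Dict, List
--
-- def calculate_topic_coverage(extractions: List[Dict]) -> Dict:
--     """Calculate topic coverage across all books"""
--     topics = {}
--     for extraction in extractions:
--         for topic, count in extraction.get('topic_coverage', {}).items():
--             if topic not in topics:
--                 topics[topic] = {'books': 0, 'pages': 0}
--             topics[topic]['books'] += 1
--             topics[topic]['pages'] += count
--     return topics
-- ===== SOURCE B (Python) =====
-- from typing import Dict, List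
--
-- def calculate_topic_coverage(extractions: List[Dict]) -> Dict:
--     """Calculate topic coverage across all books"""
--     # Stage 1: project out the coverage dicts and the distinct topics, first-appearance order.
--     covs = [e.get('topic_coverage', {}) for e in extractions]
--     order = list(dict.fromkeys(t for tc in covs for t in tc))
--     # Stage 2: for each topic, recompute its stats by scanning the coverage dicts.
--     return {t: {'books': sum(1 for tc in covs if t in tc),
--                 'pages': sum(tc[t] for tc in covs if t in tc)}
--             for t in order}
-- ===== Notes on version B (the rewrite author's own statement) =====
-- stated objective: alternative
-- what changed: Replaces A's single-pass accumulation into a nested dict-of-dicts with a two-stage per-topic recomputation: first collect the distinct topics in first-appearance order, then for each topic scan the list of coverage dicts to count the books containing it and sum its page counts.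
import Mathlib
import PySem

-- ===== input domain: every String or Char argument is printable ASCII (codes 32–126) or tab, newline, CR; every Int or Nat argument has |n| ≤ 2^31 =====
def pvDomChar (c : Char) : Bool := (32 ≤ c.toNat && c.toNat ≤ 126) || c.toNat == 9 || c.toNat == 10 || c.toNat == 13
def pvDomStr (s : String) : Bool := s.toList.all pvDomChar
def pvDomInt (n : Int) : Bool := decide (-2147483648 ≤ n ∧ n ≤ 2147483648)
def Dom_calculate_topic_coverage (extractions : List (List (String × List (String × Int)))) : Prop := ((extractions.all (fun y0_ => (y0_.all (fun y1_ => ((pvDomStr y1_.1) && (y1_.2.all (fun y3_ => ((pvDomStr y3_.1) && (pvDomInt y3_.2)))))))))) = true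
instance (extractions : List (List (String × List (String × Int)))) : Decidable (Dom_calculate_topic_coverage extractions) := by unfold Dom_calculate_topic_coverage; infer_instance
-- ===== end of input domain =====

-- B replaces A's single-pass nested-dict accumulation with a two-stage per-topic
-- recomputation (distinct topics first, then a scan of the coverage dicts per topic):
-- an alternative decomposition, not claimed faster.

-- ===== PORT A =====
-- A: one pass; for each (topic, count) pair mutate a dict of {'books','pages'} records.
def calculate_topic_coverage (extractions : List (List (String × List (String × Int)))) : List (String × List (String × Int)) :=
  let topics : PySem.Dict String (PySem.Dict String Int) :=
    extractions.foldl (fun topics extraction =>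
      (PySem.Dict.ofList ((PySem.Dict.mk extraction).getD "topic_coverage" [])).items.foldl (fun topics tc =>
        let topics :=
          if topics.contains tc.1 then topics
          else topics.insert tc.1 (PySem.Dict.mk [("books", (0 : Int)), ("pages", (0 : Int))])
        let topics := topics.modify tc.1 PySem.Dict.empty (fun d => d.modify "books" 0 (· + 1))
        topics.modify tc.1 PySem.Dict.empty (fun d => d.modify "pages" 0 (· + tc.2))) topics)
      PySem.Dict.empty
  topics.items.map (fun p => (p.1, p.2.items))

-- ===== PORT B =====
-- B: stage 1 collects the coverage dicts and the distinct topics (first appearance);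
-- stage 2 rescans the coverage dicts once per topic (membership count, lookup sum).
def calculate_topic_coverage_alt (extractions : List (List (String × List (String × Int)))) : List (String × List (String × Int)) :=
  let covs : List (PySem.Dict String Int) :=
    extractions.map (fun e => PySem.Dict.ofList ((PySem.Dict.mk e).getD "topic_coverage" []))
  let order : List String := PySem.List.dedup (covs.flatMap (fun tc => tc.keys))
  order.map (fun t =>
    (t, [("books", ((covs.filter (fun tc => tc.contains t)).map (fun _ => (1 : Int))).sum),
         ("pages", ((covs.filter (fun tc => tc.contains t)).map (fun tc => tc.getD t 0)).sum)]))

-- ===== PRECONDITION & SPEC =====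
def Spec_calculate_topic_coverage (extractions : List (List (String × List (String × Int)))) (out : List (String × List (String × Int))) : Prop := out = calculate_topic_coverage_alt extractions
instance (extractions : List (List (String × List (String × Int)))) (out : List (String × List (String × Int))) : Decidable (Spec_calculate_topic_coverage extractions out) := by unfold Spec_calculate_topic_coverage; infer_instance

-- ===== CLAIM (what is proved, stated in full; the proofs are below) =====
def Claim_equal_calculate_topic_coverage : Prop := ∀ (extractions : List (List (String × List (String × Int)))), Dom_calculate_topic_coverage extractions → Spec_calculate_topic_coverage extractions (calculate_topic_coverage extractions)

-- ===== LEMMAS AND PROOFS =====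

-- A's per-pair update: the contains-test + insert-default + two modifies is one modify
-- with default {'books': 0, 'pages': 0}.
def pvInit : PySem.Dict String Int := PySem.Dict.mk [("books", 0), ("pages", 0)]

def pvUpd (c : Int) (d : PySem.Dict String Int) : PySem.Dict String Int :=
  (d.modify "books" 0 (· + 1)).modify "pages" 0 (· + c)

lemma getD_congr_of_contains {ν : Type} (d : PySem.Dict String ν) (k : String)
    (h : d.contains k = true) (v1 v2 : ν) : d.getD k v1 = d.getD k v2 := by
  have hs : (d.get? k).isSome = true := by rw [← PySem.Dict.contains_eq_isSome_get?]; exact h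
  rcases Option.isSome_iff_exists.mp hs with ⟨v, hv⟩
  rw [PySem.Dict.getD_eq_get?_getD, PySem.Dict.getD_eq_get?_getD, hv]
  rfl

lemma stepA_eq_modify (topics : PySem.Dict String (PySem.Dict String Int)) (tc : String × Int) :
    ((if topics.contains tc.1 then topics
      else topics.insert tc.1 pvInit).modify tc.1 PySem.Dict.empty (fun d => d.modify "books" 0 (· + 1))).modify
        tc.1 PySem.Dict.empty (fun d => d.modify "pages" 0 (· + tc.2))
      = topics.modify tc.1 pvInit (pvUpd tc.2) := by
  unfold pvUpd PySem.Dict.modify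
  rw [PySem.Dict.getD_insert_self, PySem.Dict.insert_insert_self]
  by_cases h : topics.contains tc.1 = true
  · simp only [h, if_pos]
    rw [getD_congr_of_contains topics tc.1 h PySem.Dict.empty pvInit]
  · simp only [Bool.not_eq_true] at h
    simp only [h, Bool.false_eq_true, if_neg, not_false_iff]
    rw [PySem.Dict.getD_insert_self, PySem.Dict.getD_of_not_contains _ _ h,
        PySem.Dict.insert_insert_self]

-- value-at-a-key through a fold of modifies keyed by the pair's first component
lemma getD_foldl_modify_key {ν : Type} (pairs : List (String × Int)) (f : Int → ν → ν)
    (d : PySem.Dict String ν) (v0 : ν) (k : String) :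
    (pairs.foldl (fun d p => d.modify p.1 v0 (f p.2)) d).getD k v0
      = (pairs.filter (fun p => p.1 == k)).foldl (fun acc p => f p.2 acc) (d.getD k v0) := by
  induction pairs generalizing d with
  | nil => rfl
  | cons p t ih =>
    simp only [List.foldl_cons, List.filter_cons]
    by_cases h : p.1 = k
    · subst h
      simp only [BEq.rfl, if_pos, List.foldl_cons, ih, PySem.Dict.getD_modify_self]
    · rw [ih, PySem.Dict.getD_modify, if_neg (Ne.symm h)]
      simp [h]

lemma pvUpd_mk (b q c : Int) :
    pvUpd c (PySem.Dict.mk [("books", b), ("pages", q)]) = PySem.Dict.mk [("books", b + 1), ("pages", q + c)] := by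
  simp [pvUpd, PySem.Dict.modify, PySem.Dict.insert, PySem.Dict.getD, PySem.Dict.get?]

-- folding A's per-pair update over any list, starting from a {'books','pages'} record
lemma foldl_pvUpd (l : List (String × Int)) (b q : Int) :
    l.foldl (fun acc p => pvUpd p.2 acc) (PySem.Dict.mk [("books", b), ("pages", q)])
      = PySem.Dict.mk [("books", b + l.length), ("pages", q + (l.map (·.2)).sum)] := by
  induction l generalizing b q with
  | nil => simp
  | cons p t ih =>
    simp only [List.foldl_cons, pvUpd_mk, ih, List.length_cons, List.map_cons, List.sum_cons]
    apply PySem.Dict.ext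
    simp only [Prod.mk.injEq, List.cons.injEq, and_true, true_and]
    constructor
    · push_cast; ring
    · ring

-- flatMap congruence on members
lemma flatMap_congr_mem {α β : Type} (l : List α) (f g : α → List β)
    (h : ∀ x ∈ l, f x = g x) : l.flatMap f = l.flatMap g := by
  induction l with
  | nil => rfl
  | cons a t ih =>
    simp only [List.flatMap_cons, h a (List.mem_cons_self), ih (fun x hx => h x (List.mem_cons_of_mem a hx))]

-- filtering an assoc list with nodup keys for one key yields that key's unique entry
lemma filter_key_of_nodup (l : List (String × Int)) (k : String)
    (h : (l.map Prod.fst).Nodup) :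
    l.filter (fun p => p.1 == k)
      = if (PySem.Dict.mk l).contains k then [(k, (PySem.Dict.mk l).getD k 0)] else [] := by
  induction l with
  | nil => rfl
  | cons a t ih =>
    simp only [List.map_cons, List.nodup_cons] at h
    by_cases hk : a.1 = k
    · have ht : t.filter (fun p => p.1 == k) = [] := by
        apply List.filter_eq_nil_iff.mpr
        intro p hp hpk
        exact h.1 (hk ▸ (by simpa using hpk) ▸ List.mem_map_of_mem hp)
      have hc : (PySem.Dict.mk (a :: t)).contains k = true := by
        rw [PySem.Dict.contains_eq_isSome_get?, PySem.Dict.get?_mk_cons]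
        simp [hk]
      have hg : (PySem.Dict.mk (a :: t)).getD k 0 = a.2 := by
        rw [PySem.Dict.getD_eq_get?_getD, PySem.Dict.get?_mk_cons]
        simp [hk]
      simp [hk, ht, hc, hg, Prod.ext_iff]
    · have hc : (PySem.Dict.mk (a :: t)).contains k = (PySem.Dict.mk t).contains k := by
        rw [PySem.Dict.contains_eq_isSome_get?, PySem.Dict.contains_eq_isSome_get?,
            PySem.Dict.get?_mk_cons]
        simp [hk]
      have hg : (PySem.Dict.mk (a :: t)).getD k 0 = (PySem.Dict.mk t).getD k 0 := by
        rw [PySem.Dict.getD_eq_get?_getD, PySem.Dict.getD_eq_get?_getD, PySem.Dict.get?_mk_cons]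
        simp [hk]
      simp only [List.filter_cons, show (a.1 == k) = false by simp [hk], Bool.false_eq_true,
        if_neg, not_false_iff, ih h.2, hc, hg]

-- the same, for any Dict with nodup keys
lemma items_filter_key (tc : PySem.Dict String Int) (k : String) (h : tc.keys.Nodup) :
    tc.items.filter (fun p => p.1 == k)
      = if tc.contains k then [(k, tc.getD k 0)] else [] := by
  have : tc = PySem.Dict.mk tc.items := rfl
  rw [this] at *
  exact filter_key_of_nodup tc.items k h

-- length of the per-topic singleton flatMap = number of dicts containing the key
lemma length_flatMap_key (cs : List (PySem.Dict String Int)) (k : String) :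
    (cs.flatMap (fun tc => if tc.contains k then [(k, tc.getD k 0)] else [])).length
      = cs.countP (fun tc => tc.contains k) := by
  induction cs with
  | nil => rfl
  | cons c t ih =>
    by_cases h : c.contains k = true <;>
      simp [List.flatMap_cons, h, ih]

-- sum of values of the per-topic singleton flatMap = B's pages sum
lemma sum_flatMap_key (cs : List (PySem.Dict String Int)) (k : String) :
    ((cs.flatMap (fun tc => if tc.contains k then [(k, tc.getD k 0)] else [])).map Prod.snd).sum
      = ((cs.filter (fun tc => tc.contains k)).map (fun tc => tc.getD k 0)).sum := by
  induction cs with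
  | nil => rfl
  | cons c t ih =>
    by_cases h : c.contains k = true <;>
      simp [List.flatMap_cons, h, ih]

-- B's books sum of ones = countP
lemma sum_ones_eq_countP (cs : List (PySem.Dict String Int)) (k : String) :
    ((cs.filter (fun tc => tc.contains k)).map (fun _ => (1 : Int))).sum
      = (cs.countP (fun tc => tc.contains k) : Int) := by
  induction cs with
  | nil => rfl
  | cons c t ih =>
    by_cases h : c.contains k = true <;>
      simp [h, List.countP_eq_length_filter]
    ring

-- ===== VERDICT (by name: the statement is the Claim_ definition above) =====

theorem calculate_topic_coverage_spec : Claim_equal_calculate_topic_coverage := by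
  intro extractions _
  unfold Spec_calculate_topic_coverage calculate_topic_coverage calculate_topic_coverage_alt
  simp only []
  set covs : List (PySem.Dict String Int) :=
    extractions.map (fun e => PySem.Dict.ofList ((PySem.Dict.mk e).getD "topic_coverage" [])) with hcovs
  set pairs : List (String × Int) := covs.flatMap (fun tc => tc.items) with hpairs
  have hmemnd : ∀ tc ∈ covs, tc.keys.Nodup := by
    intro tc htc
    rcases List.mem_map.mp htc with ⟨e, _, he⟩
    exact he ▸ PySem.Dict.nodup_keys_ofList _
  -- A's nested fold is a fold over the flattened pairs, of a single modify per pair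
  have hA : extractions.foldl (fun topics extraction =>
      (PySem.Dict.ofList ((PySem.Dict.mk extraction).getD "topic_coverage" [])).items.foldl (fun topics tc =>
        let topics :=
          if topics.contains tc.1 then topics
          else topics.insert tc.1 (PySem.Dict.mk [("books", (0 : Int)), ("pages", (0 : Int))])
        let topics := topics.modify tc.1 PySem.Dict.empty (fun d => d.modify "books" 0 (· + 1))
        topics.modify tc.1 PySem.Dict.empty (fun d => d.modify "pages" 0 (· + tc.2))) topics)
      PySem.Dict.empty
      = pairs.foldl (fun d p => d.modify p.1 pvInit (pvUpd p.2)) PySem.Dict.empty := by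
    rw [hpairs, List.foldl_flatMap, hcovs, List.foldl_map]
    apply PySem.List.foldl_congr_mem
    intro acc x _
    apply PySem.List.foldl_congr_mem
    intro a p _
    exact stepA_eq_modify a p
  rw [hA]
  set tA := pairs.foldl (fun d p => d.modify p.1 pvInit (pvUpd p.2)) PySem.Dict.empty with htA
  -- key order agrees
  have hkA : tA.keys = PySem.Set.update PySem.Dict.empty.keys (pairs.map (·.1)) :=
    PySem.Dict.keys_foldl_modify_key pairs (·.1) pvInit (fun _ p => pvUpd p.2) PySem.Dict.empty
  have hndA : tA.keys.Nodup :=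
    PySem.Dict.nodup_keys_foldl_modify_key pairs (·.1) pvInit (fun _ p => pvUpd p.2) PySem.Dict.empty (by simp)
  have horder : PySem.List.dedup (covs.flatMap (fun tc => tc.keys)) = tA.keys := by
    rw [hkA]
    have : covs.flatMap (fun tc => tc.keys) = pairs.map (·.1) := by
      rw [hpairs, List.map_flatMap]
      rfl
    rw [this]
    simp [PySem.List.dedup_eq_ofList]
    rfl
  rw [PySem.Dict.items_eq_map_keys tA hndA pvInit, List.map_map, ← horder]
  -- pointwise agreement on each key
  apply List.map_congr_left
  intro k hk
  simp only [Function.comp_apply]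
  -- A's record at k
  have h1 : tA.getD k pvInit
      = (pairs.filter (fun p => p.1 == k)).foldl (fun acc p => pvUpd p.2 acc)
          (PySem.Dict.empty.getD k pvInit) :=
    getD_foldl_modify_key pairs (fun c d => pvUpd c d) PySem.Dict.empty pvInit k
  rw [PySem.Dict.getD_empty] at h1
  have h2 := foldl_pvUpd (pairs.filter (fun p => p.1 == k)) 0 0
  rw [show PySem.Dict.mk [("books", (0:Int)), ("pages", (0:Int))] = pvInit from rfl] at h2
  rw [h1, h2]
  -- the filtered pair list is the per-dict singleton flatMap
  have hfil : pairs.filter (fun p => p.1 == k)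
      = covs.flatMap (fun tc => if tc.contains k then [(k, tc.getD k 0)] else []) := by
    rw [hpairs]
    have : (covs.flatMap (fun tc => tc.items)).filter (fun p => p.1 == k)
        = covs.flatMap (fun tc => tc.items.filter (fun p => p.1 == k)) := by
      simp [List.flatMap_def, List.filter_flatten, List.map_map]
      rfl
    rw [this]
    exact flatMap_congr_mem covs _ _ (fun tc htc => items_filter_key tc k (hmemnd tc htc))
  rw [hfil]
  -- books and pages agree
  have hb : ((0 : Int) + ((covs.flatMap (fun tc => if tc.contains k then [(k, tc.getD k 0)] else [])).length : Int))
      = ((covs.filter (fun tc => tc.contains k)).map (fun _ => (1 : Int))).sum := by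
    rw [length_flatMap_key, sum_ones_eq_countP]
    ring
  have hp : ((0 : Int) + ((covs.flatMap (fun tc => if tc.contains k then [(k, tc.getD k 0)] else [])).map (·.2)).sum)
      = ((covs.filter (fun tc => tc.contains k)).map (fun tc => tc.getD k 0)).sum := by
    rw [show ((·.2) : String × Int → Int) = Prod.snd from rfl, sum_flatMap_key]
    ring
  rw [show (PySem.Dict.mk [("books", (0:Int) + ((covs.flatMap (fun tc => if tc.contains k then [(k, tc.getD k 0)] else [])).length : Int)), ("pages", (0:Int) + ((covs.flatMap (fun tc => if tc.contains k then [(k, tc.getD k 0)] else [])).map (·.2)).sum)]).items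
      = [("books", (0:Int) + ((covs.flatMap (fun tc => if tc.contains k then [(k, tc.getD k 0)] else [])).length : Int)), ("pages", (0:Int) + ((covs.flatMap (fun tc => if tc.contains k then [(k, tc.getD k 0)] else [])).map (·.2)).sum)] from rfl]
  rw [hb, hp]
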